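-- pv_equiv track=rewrite | github.com/PlathsOven/model-x | modelx/config.py | _strip_trailing_comment
-- ===== SOURCE A (Python) =====
-- def _strip_trailing_comment(line: str) -> str:
--     """Remove `# ...` from a line, but not when inside quotes."""
--     in_single = False
--     in_double = False
--     for i, ch in enumerate(line):
--         if ch == "'" and not in_double:
--             in_single = not in_single
--         elif ch == '"' and not in_single:
--             in_double = not in_double
--         elif ch == "#" and not in_single and not in_double:
--             return line[:i]
--     return line
-- ===== SOURCE B (Python) =====
-- def _strip_trailing_comment(line: str) -> str:
--     """Remove `# ...` from a line, but not when inside quotes.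
--
--     Skips whole quoted regions at once via str.find instead of
--     maintaining per-character in_single/in_double flags."""
--     i = 0
--     n = len(line)
--     while i < n:
--         ch = line[i]
--         if ch == '#':
--             return line[:i]
--         if ch == "'" or ch == '"':
--             close = line.find(ch, i + 1)
--             if close == -1:
--                 return line
--             i = close + 1
--         else:
--             i += 1
--     return line
-- ===== Notes on version B (the rewrite author's own statement) =====
-- stated objective: alternative
-- what changed: Replaces A's per-character scan with two quote-state booleans by an index scan that, upon meeting a quote, jumps past the whole quoted region at once with str.find (unterminated quote returns the line unchanged, as in A).
import Mathlib
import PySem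

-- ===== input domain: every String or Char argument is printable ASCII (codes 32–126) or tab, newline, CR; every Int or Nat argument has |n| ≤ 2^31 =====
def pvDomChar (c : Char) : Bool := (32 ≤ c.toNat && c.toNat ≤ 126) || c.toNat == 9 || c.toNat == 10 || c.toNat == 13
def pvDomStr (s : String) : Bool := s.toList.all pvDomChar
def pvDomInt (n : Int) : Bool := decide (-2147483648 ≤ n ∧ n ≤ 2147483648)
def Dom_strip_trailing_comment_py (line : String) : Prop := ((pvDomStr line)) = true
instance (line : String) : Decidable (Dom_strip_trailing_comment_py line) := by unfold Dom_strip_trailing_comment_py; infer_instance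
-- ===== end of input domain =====

-- B replaces A's two-boolean per-character scan by a scan that skips whole
-- quoted regions at once via find; alternative structure, same O(n) cost.


-- ===== PORT A =====
-- A's loop over (i, ch) with early return line[:i]; the port emits the
-- consumed prefix as it scans (line[:i] = chars seen so far), same branches
-- in the same order over the same in_single/in_double state.
def pvAGo : List Char → Bool → Bool → List Char
  | [], _, _ => []
  | c :: rest, s, d =>
    if c = '\'' ∧ d = false then c :: pvAGo rest (!s) d
    else if c = '"' ∧ s = false then c :: pvAGo rest s (!d)
    else if c = '#' ∧ s = false ∧ d = false then []
    else c :: pvAGo rest s d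

def strip_trailing_comment_py (line : String) : String :=
  String.mk (pvAGo line.toList false false)

-- ===== PORT B =====
-- Source B's index loop: '#' → return prefix; a quote → line.find of the closing
-- quote (List.findIdx? on the rest) and jump past it; otherwise step by one.
def pvBGo : List Char → List Char
  | [] => []
  | c :: rest =>
    if c = '#' then []
    else if c = '\'' ∨ c = '"' then
      match h : rest.findIdx? (· = c) with
      | none => c :: rest
      | some j => c :: (rest.take (j + 1) ++ pvBGo (rest.drop (j + 1)))
    else c :: pvBGo rest
termination_by l => l.length
decreasing_by
  · simp only [List.length_cons, List.length_drop]; omega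
  · simp

def strip_trailing_comment_py_alt (line : String) : String :=
  String.mk (pvBGo line.toList)

-- ===== PRECONDITION & SPEC =====
def Spec_strip_trailing_comment_py (line : String) (out : String) : Prop := out = strip_trailing_comment_py_alt line
instance (line : String) (out : String) : Decidable (Spec_strip_trailing_comment_py line out) := by unfold Spec_strip_trailing_comment_py; infer_instance

-- ===== CLAIM (what is proved, stated in full; the proofs are below) =====
def Claim_equal_strip_trailing_comment_py : Prop := ∀ (line : String), Dom_strip_trailing_comment_py line → Spec_strip_trailing_comment_py line (strip_trailing_comment_py line)

-- ===== LEMMAS AND PROOFS =====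

-- Inside a quote q (single: state (true,false); double: (false,true)) A emits
-- every char up to and including the closing q, then resumes in state
-- (false,false); with no closing q it emits the rest unchanged.
lemma pvAGo_quote (q : Char) (hq : q = '\'' ∨ q = '"') (l : List Char) :
    pvAGo l (q = '\'') (q = '"') =
      match l.findIdx? (· = q) with
      | none => l
      | some j => l.take (j + 1) ++ pvAGo (l.drop (j + 1)) false false := by
  induction l with
  | nil => simp [pvAGo]
  | cons c rest ih =>
    by_cases hc : c = q
    · subst hc
      rcases hq with h | h <;> subst h <;>
        simp [pvAGo, List.findIdx?_cons]
    · have hfind : (c :: rest).findIdx? (· = q) =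
          (rest.findIdx? (· = q)).map (· + 1) := by
        simp [List.findIdx?_cons, hc]
      have hstep : pvAGo (c :: rest) (q = '\'') (q = '"') =
          c :: pvAGo rest (q = '\'') (q = '"') := by
        rcases hq with h | h <;> subst h <;> simp [pvAGo, hc]
      rw [hstep, ih, hfind]
      cases hr : rest.findIdx? (· = q) <;> simp [hr]

lemma pvGo_eq : ∀ (n : ℕ) (l : List Char), l.length ≤ n →
    pvAGo l false false = pvBGo l := by
  intro n
  induction n with
  | zero =>
    intro l hl
    have : l = [] := List.eq_nil_of_length_eq_zero (Nat.le_zero.mp hl)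
    subst this; simp [pvAGo, pvBGo]
  | succ n ih =>
    intro l hl
    match l with
    | [] => simp [pvAGo, pvBGo]
    | c :: rest =>
      simp only [List.length_cons, Nat.succ_le_succ_iff] at hl
      by_cases hq : c = '\'' ∨ c = '"'
      · have hnh : c ≠ '#' := by rcases hq with h | h <;> subst h <;> decide
        have hA : pvAGo (c :: rest) false false =
            c :: pvAGo rest (c = '\'') (c = '"') := by
          rcases hq with h | h <;> subst h <;> simp [pvAGo]
        rw [hA, pvAGo_quote c hq rest]
        rw [pvBGo]
        rw [if_neg hnh, if_pos hq]
        cases hrest : rest.findIdx? (· = c) with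
        | none => simp
        | some j =>
          simp only []
          congr 1
          congr 1
          exact ih _ (by simp only [List.length_drop]; omega)
      · rw [not_or] at hq
        by_cases hh : c = '#'
        · subst hh
          simp [pvAGo, pvBGo]
        · have hA : pvAGo (c :: rest) false false =
              c :: pvAGo rest false false := by
            simp [pvAGo, hq.1, hq.2, hh]
          rw [hA, pvBGo, if_neg hh, if_neg (by rintro (h | h) <;> [exact hq.1 h; exact hq.2 h])]
          rw [ih rest hl]

-- ===== VERDICT (by name: the statement is the Claim_ definition above) =====
theorem strip_trailing_comment_py_spec : Claim_equal_strip_trailing_comment_py := by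
  intro line _
  unfold Spec_strip_trailing_comment_py strip_trailing_comment_py strip_trailing_comment_py_alt
  rw [pvGo_eq line.toList.length line.toList le_rfl]
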